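-- pv_equiv track=rewrite | github.com/yongunt/problems | oddly_or_evenly_positioned_from_last/main.py | char_at_pos
-- ===== SOURCE A (Python) =====
-- def char_at_pos(x, y):
--     if y == "even":
--         if isinstance(x, list):
--             ans:list = []
--             for i in range(1, len(x), 2):
--                 ans.append(x[i])
--         elif isinstance(x, str):
--             ans:str = ""
--             for i in range(1, len(x), 2):
--                 ans += x[i]
--         return ans
--
--     else:
--         if isinstance(x, list):
--             ans:list = []
--             for i in range(0, len(x), 2):
--                 ans.append(x[::-1][i])
--         elif isinstance(x, str):
--             ans:str = ""
--             for i in range(0, len(x), 2):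
--                 ans += x[::-1][i]
--         return ans[::-1]
-- ===== SOURCE B (Python) =====
-- def char_at_pos(x, y):
--     if y == "even":
--         return x[1::2]
--     # odd counted from the end: start index is 1 for even length, 0 for odd length
--     return x[(len(x) - 1) % 2::2]
-- ===== Notes on version B (the rewrite author's own statement) =====
-- stated objective: faster
-- what changed: Replaces the index loops with direct slicing and, in the odd branch, replaces A's reverse-pick-reverse (rebuilding x[::-1] afresh on every iteration) by a closed-form parity start (len(x)-1)%2 with a single stride-2 slice.
import Mathlib
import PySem

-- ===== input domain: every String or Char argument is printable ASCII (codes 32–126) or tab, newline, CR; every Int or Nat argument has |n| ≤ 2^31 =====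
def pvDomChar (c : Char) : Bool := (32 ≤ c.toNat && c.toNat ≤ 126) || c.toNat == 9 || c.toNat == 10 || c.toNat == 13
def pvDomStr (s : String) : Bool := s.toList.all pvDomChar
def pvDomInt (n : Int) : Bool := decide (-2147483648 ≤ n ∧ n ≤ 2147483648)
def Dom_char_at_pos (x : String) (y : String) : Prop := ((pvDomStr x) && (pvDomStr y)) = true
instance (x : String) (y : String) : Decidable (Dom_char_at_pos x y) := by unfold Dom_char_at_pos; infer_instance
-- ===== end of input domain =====

-- B replaces A's index loops (and the odd branch's reverse-pick-reverse) by stride-2 slices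
-- with a closed-form parity start; objective: simpler.


-- ===== PORT A =====
-- x is a str under the type convention, so the `isinstance(x, str)` branch is the one taken.
def char_at_pos (x : String) (y : String) : String :=
  let l := x.toList
  if y == "even" then
    -- ans = ""; for i in range(1, len(x), 2): ans += x[i]
    let ans : List Char :=
      (PySem.List.pyRange 1 (l.length : Int) 2).foldl
        (fun acc i => acc ++ [PySem.List.pyGetD l i ' ']) []
    String.ofList ans
  else
    -- ans = ""; for i in range(0, len(x), 2): ans += x[::-1][i];  return ans[::-1]
    let ans : List Char :=
      (PySem.List.pyRange 0 (l.length : Int) 2).foldl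
        (fun acc i => acc ++ [PySem.List.pyGetD l.reverse i ' ']) []
    String.ofList ans.reverse

-- ===== PORT B =====
def char_at_pos_alt (x : String) (y : String) : String :=
  let l := x.toList
  if y == "even" then
    -- return x[1::2]
    String.ofList ((PySem.List.slice? l (some 1) none 2).getD [])
  else
    -- return x[(len(x) - 1) % 2::2]
    let start := PySem.Int.mod ((l.length : Int) - 1) 2
    String.ofList ((PySem.List.slice? l (some start) none 2).getD [])

-- ===== PRECONDITION & SPEC =====
def Spec_char_at_pos (x : String) (y : String) (out : String) : Prop := out = char_at_pos_alt x y
instance (x : String) (y : String) (out : String) : Decidable (Spec_char_at_pos x y out) := by unfold Spec_char_at_pos; infer_instance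

-- ===== CLAIM (what is proved, stated in full; the proofs are below) =====
def Claim_equal_char_at_pos : Prop := ∀ (x : String) (y : String), Dom_char_at_pos x y → Spec_char_at_pos x y (char_at_pos x y)

-- ===== LEMMAS AND PROOFS =====

-- The filterMap a stride-2 slice produces is a plain map of pyGetD when every index is in range.
theorem pv_fm_eq_map (l : List Char) (r : List Nat) (s : Int)
    (h : ∀ k ∈ r, 0 ≤ s + 2 * (k : Int) ∧ s + 2 * (k : Int) < l.length) :
    List.filterMap (fun (k : Nat) => l[(s + 2 * (k : Int)).toNat]?) r
      = List.map (fun (k : Nat) => PySem.List.pyGetD l (s + 2 * (k : Int)) ' ') r := by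
  induction r with
  | nil => simp
  | cons a t ih =>
    obtain ⟨h0, h1⟩ := h a (List.mem_cons_self)
    have hlt : (s + 2 * (a : Int)).toNat < l.length := by omega
    simp only [List.filterMap_cons, List.map_cons, List.getElem?_eq_getElem hlt,
      ih (fun k hk => h k (List.mem_cons_of_mem _ hk)),
      PySem.List.pyGetD_eq_getElem l ' ' h0 (by omega)]

-- A's even-branch loop equals B's x[1::2].
theorem pv_even_side (l : List Char) :
    (PySem.List.pyRange 1 (l.length : Int) 2).foldl
        (fun acc i => acc ++ [PySem.List.pyGetD l i ' ']) []
      = (PySem.List.slice? l (some 1) none 2).getD [] := by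
  rw [PySem.List.foldl_append_singleton_eq_map, List.nil_append,
      PySem.List.pyRange_of_pos 1 (l.length : Int) (by norm_num), List.map_map]
  simp only [PySem.List.slice?, PySem.List.sliceIndices]
  norm_num
  rcases Nat.eq_zero_or_pos l.length with h0 | h0
  · simp [List.length_eq_zero_iff.mp h0]
  · have hmin1 : min (1 : Int) (l.length : Int) = 1 := by omega
    rw [hmin1,
      pv_fm_eq_map l _ 1 (by intro k hk; simp only [List.mem_range] at hk; split at hk <;> omega)]
    simp [Function.comp]

-- Core of the odd branch: picking every other element of the reverse and reversing back
-- is picking every other element from the matching parity start.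
theorem pv_rev_pick (l : List Char) (s c : Nat)
    (h1 : ∀ i, i < c → 2 * i < l.length)
    (hrel : ∀ i, i < c → l.length - 1 - 2 * (c - 1 - i) = s + 2 * i) :
    ((List.range c).map (fun (k : Nat) => PySem.List.pyGetD l.reverse (2 * (k : Int)) ' ')).reverse
      = (List.range c).map (fun (k : Nat) => PySem.List.pyGetD l ((s : Int) + 2 * (k : Int)) ' ') := by
  apply List.ext_getElem
  · simp
  · intro i hi₁ hi₂
    simp only [List.length_reverse, List.length_map, List.length_range] at hi₁ hi₂
    have hci : c - 1 - i < c := by omega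
    have h2 : 2 * (c - 1 - i) < l.length := h1 _ hci
    have hr : l.length - 1 - 2 * (c - 1 - i) = s + 2 * i := hrel i hi₂
    have hsl : s + 2 * i < l.length := by omega
    rw [List.getElem_reverse]
    simp only [List.getElem_map, List.getElem_range, List.length_map, List.length_range]
    have e1 : (2 : Int) * ((c - 1 - i : Nat) : Int) = ((2 * (c - 1 - i) : Nat) : Int) := by
      push_cast; ring
    have e2 : ((s : Int) + 2 * (i : Int)) = ((s + 2 * i : Nat) : Int) := by push_cast; ring
    rw [e1, e2, PySem.List.pyGetD_natCast, PySem.List.pyGetD_natCast,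
        List.getD_eq_getElem _ _ (by simpa using h2), List.getD_eq_getElem _ _ hsl,
        List.getElem_reverse]
    congr 1

-- A's odd-branch reverse-pick-reverse loop equals B's x[(len(x)-1)%2::2].
theorem pv_odd_side (l : List Char) :
    ((PySem.List.pyRange 0 (l.length : Int) 2).foldl
        (fun acc i => acc ++ [PySem.List.pyGetD l.reverse i ' ']) []).reverse
      = (PySem.List.slice? l (some (PySem.Int.mod ((l.length : Int) - 1) 2)) none 2).getD [] := by
  have hmod : PySem.Int.mod ((l.length : Int) - 1) 2 = ((l.length : Int) - 1) % 2 := by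
    unfold PySem.Int.mod
    rw [Int.fmod_eq_emod]
    simp
  rw [hmod, PySem.List.foldl_append_singleton_eq_map, List.nil_append,
      PySem.List.pyRange_of_pos 0 (l.length : Int) (by norm_num), List.map_map]
  rcases Nat.eq_zero_or_pos l.length with h0 | h0
  · rw [List.length_eq_zero_iff.mp h0]
    simp [PySem.List.slice?, PySem.List.sliceIndices]
  · simp only [PySem.List.slice?, PySem.List.sliceIndices]
    norm_num
    have hm : (if ((l.length:Int) - 1) % 2 < 0 then max (((l.length:Int)-1)%2 + (l.length:Int)) 0
        else min (((l.length:Int)-1)%2) (l.length:Int)) = ((l.length:Int)-1)%2 := by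
      split_ifs <;> omega
    rw [hm]
    have hc : (if ((l.length:Int)-1)%2 < (l.length:Int)
          then (((l.length:Int) - ((l.length:Int)-1)%2 + 2 - 1)/2).toNat else 0)
        = (if 0 < l.length then (((l.length:Int) + 2 - 1) / 2).toNat else 0) := by
      split_ifs <;> omega
    rw [hc, pv_fm_eq_map l _ _
        (by intro k hk; simp only [List.mem_range] at hk; split at hk <;> omega)]
    have hs : (((l.length:Int)-1)%2) = (((((l.length:Int)-1)%2).toNat : Nat) : Int) := by omega
    conv_rhs => rw [hs]
    rw [← pv_rev_pick l ((((l.length:Int)-1)%2).toNat) _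
        (by intro i hi; split at hi <;> omega)
        (by intro i hi; rw [if_pos h0] at hi ⊢; omega)]
    simp [Function.comp]

-- ===== VERDICT (by name: the statement is the Claim_ definition above) =====
theorem char_at_pos_spec : Claim_equal_char_at_pos := by
  intro x y _
  unfold Spec_char_at_pos char_at_pos char_at_pos_alt
  by_cases h : y == "even" <;> simp only [h, Bool.false_eq_true, if_true, if_false]
  · rw [pv_even_side]
  · rw [pv_odd_side]
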